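-- pv_equiv track=rewrite | github.com/benneberg/contextcompiler | ccc/generators/pkml.py | _parse_routes
-- ===== SOURCE A (Python) =====
-- from typing import Any, Dict, List, Optional
--
-- def _parse_routes(routes_txt: str) -> List[Dict]:
--     """Parse routes.txt into a list of {method, path, file} dicts."""
--     routes = []
--     current_file = None
--     for line in routes_txt.splitlines():
--         if line.startswith("##"):
--             current_file = line[2:].strip()
--         elif line.strip() and not line.startswith("#"):
--             parts = line.strip().split(None, 1)
--             if len(parts) == 2:
--                 method, path = parts
--                 routes.append({
--                     "method": method.upper(),
--                     "path": path,
--                     "file": current_file,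
--                 })
--     return routes
-- ===== SOURCE B (Python) =====
-- from typing import Any, Dict, List, Optional
--
-- def _split_sections(lines):
--     """Split lines into (leading block, [(file, block), ...]) at header lines."""
--     if not lines:
--         return [], []
--     first, rest = lines[0], lines[1:]
--     head, secs = _split_sections(rest)
--     if first.startswith("##"):
--         return [], [(first[2:].strip(), head)] + secs
--     return [first] + head, secs
--
-- def _parse_line(file, line):
--     if line.startswith("#") or not line.strip():
--         return None
--     parts = line.strip().split(None, 1)
--     if len(parts) != 2:
--         return None
--     return {"method": parts[0].upper(), "path": parts[1], "file": file}
--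
-- def _parse_block(file, block):
--     return [r for r in (_parse_line(file, line) for line in block) if r is not None]
--
-- def _parse_routes(routes_txt: str) -> List[Dict]:
--     """Parse routes.txt into a list of {method, path, file} dicts."""
--     head, sections = _split_sections(routes_txt.splitlines())
--     routes = _parse_block(None, head)
--     for file, block in sections:
--         routes += _parse_block(file, block)
--     return routes
-- ===== Notes on version B (the rewrite author's own statement) =====
-- stated objective: alternative
-- what changed: A's single stateful scan carrying current_file is replaced by a group-then-parse decomposition: a recursive pass splits the lines into header-delimited sections, then each block is parsed independently with a per-line Optional parser and a comprehension.
import Mathlib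
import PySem

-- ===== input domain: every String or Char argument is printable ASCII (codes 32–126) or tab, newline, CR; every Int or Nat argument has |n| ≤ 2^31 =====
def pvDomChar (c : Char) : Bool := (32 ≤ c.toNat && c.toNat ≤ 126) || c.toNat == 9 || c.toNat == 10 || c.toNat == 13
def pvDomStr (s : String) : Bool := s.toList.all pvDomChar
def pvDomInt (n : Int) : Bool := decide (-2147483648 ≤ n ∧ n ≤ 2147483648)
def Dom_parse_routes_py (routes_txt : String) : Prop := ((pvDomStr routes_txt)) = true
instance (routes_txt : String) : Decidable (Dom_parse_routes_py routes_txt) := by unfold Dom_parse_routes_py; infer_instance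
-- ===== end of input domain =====

-- B replaces A's single stateful scan (carrying current_file) by a group-then-parse
-- decomposition: split lines into header-delimited sections, then parse each block.

-- ===== PORT A =====
-- one iteration of A's for-loop; state = (current_file, routes)
def pvStepA (st : Option String × List (List (String × Option String))) (line : String) :
    Option String × List (List (String × Option String)) :=
  if PySem.Str.startswith line "##" then
    (some (PySem.Str.strip (PySem.Str.slice line (some 2) none)), st.2)
  else if (PySem.Str.strip line != "") && !(PySem.Str.startswith line "#") then
    match PySem.Str.split₀Max (PySem.Str.strip line) 1 with
    | [m, p] => (st.1, st.2 ++ [[("method", some (PySem.Str.upper m)), ("path", some p), ("file", st.1)]])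
    | _ => st
  else st

def parse_routes_py (routes_txt : String) : List (List (String × Option String)) :=
  ((PySem.Str.splitlines routes_txt).foldl pvStepA (none, [])).2

-- ===== PORT B =====
def pvSplitSections : List String → List String × List (String × List String)
  | [] => ([], [])
  | first :: rest =>
    let hs := pvSplitSections rest
    if PySem.Str.startswith first "##" then
      ([], (PySem.Str.strip (PySem.Str.slice first (some 2) none), hs.1) :: hs.2)
    else (first :: hs.1, hs.2)

def pvParseLine (file : Option String) (line : String) : Option (List (String × Option String)) :=
  if PySem.Str.startswith line "#" || (PySem.Str.strip line == "") then none
  else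
    match PySem.Str.split₀Max (PySem.Str.strip line) 1 with
    | [m, p] => some [("method", some (PySem.Str.upper m)), ("path", some p), ("file", file)]
    | _ => none

def pvParseBlock (file : Option String) (block : List String) : List (List (String × Option String)) :=
  (block.map (pvParseLine file)).filterMap id

def parse_routes_py_alt (routes_txt : String) : List (List (String × Option String)) :=
  let hs := pvSplitSections (PySem.Str.splitlines routes_txt)
  hs.2.foldl (fun routes fb => routes ++ pvParseBlock (some fb.1) fb.2) (pvParseBlock none hs.1)

-- ===== PRECONDITION & SPEC =====
def Spec_parse_routes_py (routes_txt : String) (out : List (List (String × Option String))) : Prop := out = parse_routes_py_alt routes_txt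
instance (routes_txt : String) (out : List (List (String × Option String))) : Decidable (Spec_parse_routes_py routes_txt out) := by unfold Spec_parse_routes_py; infer_instance

-- ===== CLAIM (what is proved, stated in full; the proofs are below) =====
def Claim_equal_parse_routes_py : Prop := ∀ (routes_txt : String), Dom_parse_routes_py routes_txt → Spec_parse_routes_py routes_txt (parse_routes_py routes_txt)

-- ===== LEMMAS AND PROOFS =====

-- the routes B extracts from a list of lines, parsing the leading block with file cf
def pvG (cf : Option String) (lines : List String) : List (List (String × Option String)) :=
  pvParseBlock cf (pvSplitSections lines).1 ++
    (pvSplitSections lines).2.flatMap (fun fb => pvParseBlock (some fb.1) fb.2)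

lemma pvStepA_non_header (cf : Option String) (acc : List (List (String × Option String)))
    (line : String) (h : PySem.Str.startswith line "##" = false) :
    pvStepA (cf, acc) line = (cf, acc ++ (pvParseLine cf line).toList) := by
  have h0 : PySem.Chars.startswith line.toList ['#', '#'] = false := by simpa using h
  unfold pvStepA pvParseLine
  by_cases h1 : PySem.Str.startswith line "#" = true
  · have h1' : PySem.Chars.startswith line.toList ['#'] = true := by simpa using h1
    simp [h0, h1']
  · rw [Bool.not_eq_true] at h1
    have h1' : PySem.Chars.startswith line.toList ['#'] = false := by simpa using h1
    by_cases h2 : PySem.Str.strip line = ""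
    · simp [h0, h1', h2]
    · rcases hp : PySem.Str.split₀Max (PySem.Str.strip line) 1 with _ | ⟨m, _ | ⟨p, rest⟩⟩
      · simp [h0, h1', h2, hp]
      · simp [h0, h1', h2, hp]
      · cases rest <;> simp [h0, h1', h2, hp]

lemma pvFoldA_eq (lines : List String) : ∀ (cf : Option String)
    (acc : List (List (String × Option String))),
    (lines.foldl pvStepA (cf, acc)).2 = acc ++ pvG cf lines := by
  induction lines with
  | nil => intro cf acc; simp [pvG, pvSplitSections, pvParseBlock]
  | cons l ls ih =>
    intro cf acc
    by_cases h : PySem.Str.startswith l "##" = true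
    · have h' : PySem.Chars.startswith l.toList ['#', '#'] = true := by simpa using h
      have e : pvSplitSections (l :: ls) =
          ([], (PySem.Str.strip (PySem.Str.slice l (some 2) none), (pvSplitSections ls).1)
            :: (pvSplitSections ls).2) := by
        simp [pvSplitSections, h]
        exact h'
      have hs : pvStepA (cf, acc) l =
        (some (PySem.Str.strip (PySem.Str.slice l (some 2) none)), acc) := by
        simp [pvStepA]
        intro hc; rw [h'] at hc; cases hc
      simp only [List.foldl_cons, hs, ih]
      unfold pvG
      rw [e]
      simp [pvParseBlock]
    · rw [Bool.not_eq_true] at h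
      have h' : PySem.Chars.startswith l.toList ['#', '#'] = false := by simpa using h
      have e : pvSplitSections (l :: ls) =
          (l :: (pvSplitSections ls).1, (pvSplitSections ls).2) := by
        simp [pvSplitSections]
        exact h'
      simp only [List.foldl_cons, pvStepA_non_header cf acc l h, ih]
      unfold pvG
      rw [e]
      simp only [pvParseBlock, List.map_cons, List.filterMap_cons, List.append_assoc,
        List.filterMap_map]
      cases pvParseLine cf l <;> simp

-- ===== VERDICT (by name: the statement is the Claim_ definition above) =====
theorem parse_routes_py_spec : Claim_equal_parse_routes_py := by
  intro routes_txt _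
  unfold Spec_parse_routes_py parse_routes_py parse_routes_py_alt
  rw [pvFoldA_eq]
  rw [PySem.List.foldl_append_eq_flatMap]
  simp [pvG]
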